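-- pv_equiv track=rewrite | github.com/adri-gonzalez/python-multiprocessing | 03_multiprocessing_examples/02_pandas/multithread_pandas/mp_generic.py | mp_balancer
-- ===== SOURCE A (Python) =====
-- from operator import itemgetter
--
-- def mp_balancer(task_list, n_groups, weights=None):
--     """
--     Equilibre la lista de tareas (lista de claves de tareas o ID de tareas o índices de tareas) en n_grupos para que la cantidad de trabajo sea aproximadamente la misma en cada lista.
--     lista de tareas:
--     weights: es una lista de pesos de tareas para guiar el equilibrio. Cuanto mayor sea el peso, más procesamiento necesitará.
--     n_groups: cuántos grupos de procesamiento devolver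
--     return: diccionario con claves n_groups. grupos [k] = lista de tareas para el grupo k
--
--     Balance the task_list (list of task keys or task ids or task indices) into n_groups so that the amount of work is about the same in each list.
--     task_list:
--     weights: is a list of task weights to guide the balancing. The larger the weight the more processing needed.
--     n_groups: how many processing groups to return
--
--     return: dictionary with n_groups keys. groups[k] = task list for group k
--     """
--     if weights is None:
--         weights = [1] * len(task_list)
--
--     t_list = zip(task_list, weights)  # (tid, w_tid) list
--     s_list = sorted(t_list, key=itemgetter(1), reverse=True)  # ordenar en peso descendente  [(tid, weight), ...]
--     groups = {k: [] for k in range(n_groups)}  # groups[k] = [(cid1, w1), (cid2, w2), ...]  list of tasks in group k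
--     w_dict = {k: 0 for k in range(n_groups)}  # peso acumulado de cada grupo
--
--     next_g = 0
--     for s in s_list:
--         groups[next_g].append(s[0])  # s = (tid, weight)
--         w_dict[next_g] += s[1]
--         # asignar el tid más alto disponible al grupo con el peso acumulativo más bajo
--         next_g = min(w_dict.items(), key=itemgetter(1))[0]
--     return groups  # groups[k] = [tid1, tid2, ...]
-- ===== SOURCE B (Python) =====
-- def mp_balancer(task_list, n_groups, weights=None):
--     """Greedy LPT balancing, but the group loads are kept as a lex-sorted
--     list of (load, group) pairs: the lightest group is always at the head,
--     so the per-item scan of all group weights disappears."""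
--     if weights is None:
--         weights = [1] * len(task_list)
--     pairs = sorted(zip(task_list, weights), key=lambda p: p[1], reverse=True)
--     buckets = [[] for _ in range(n_groups)]
--     order = [(0, k) for k in range(n_groups)]  # lex-sorted (load, group)
--     for tid, w in pairs:
--         load, k = order.pop(0)
--         buckets[k].append(tid)
--         entry = (load + w, k)
--         i = 0
--         while i < len(order) and order[i] < entry:
--             i += 1
--         order.insert(i, entry)
--     return {k: b for k, b in enumerate(buckets)}
-- ===== Notes on version B (the rewrite author's own statement) =====
-- stated objective: alternative
-- what changed: A rescans the whole weight dict with min() after every assignment; B keeps the group loads as a lexicographically sorted list of (load, group) pairs, pops the lightest group from the head and re-inserts the updated pair at its sorted position, and stores the groups in a plain list instead of a dict.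
import Mathlib
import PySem

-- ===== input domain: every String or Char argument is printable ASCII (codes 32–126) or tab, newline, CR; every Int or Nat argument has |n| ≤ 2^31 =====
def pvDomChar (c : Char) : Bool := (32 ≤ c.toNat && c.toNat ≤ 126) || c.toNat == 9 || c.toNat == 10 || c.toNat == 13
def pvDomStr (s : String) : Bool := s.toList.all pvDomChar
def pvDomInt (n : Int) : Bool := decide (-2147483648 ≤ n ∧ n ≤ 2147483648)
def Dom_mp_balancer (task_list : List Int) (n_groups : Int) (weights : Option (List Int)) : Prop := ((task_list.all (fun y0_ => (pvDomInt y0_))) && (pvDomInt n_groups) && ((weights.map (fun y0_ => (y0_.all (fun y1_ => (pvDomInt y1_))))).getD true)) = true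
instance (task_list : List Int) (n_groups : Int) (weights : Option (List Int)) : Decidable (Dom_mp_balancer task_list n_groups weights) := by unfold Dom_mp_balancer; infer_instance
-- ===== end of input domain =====

-- B keeps the group loads in a lexicographically sorted list of (load, group) pairs, so the
-- per-item scan of all group weights in A is replaced by popping the head; same results.

-- ===== PORT A =====
-- one iteration of A's for-loop over the weight-sorted (tid, w) pairs; state = (groups, w_dict, next_g)
-- 'groups[next_g].append(..)' / 'w_dict[next_g] += ..' are ported as insert of the updated value
-- (the KeyError Python raises when next_g is absent, i.e. n_groups <= 0 with tasks, is excluded by Pre_;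
--  likewise min() of the empty dict, for which the port's .getD (0,0) is never reached inside Pre_)
def mpStepA (st : PySem.Dict Int (List Int) × PySem.Dict Int Int × Int) (s : Int × Int) :
    PySem.Dict Int (List Int) × PySem.Dict Int Int × Int :=
  let groups := st.1.insert st.2.2 (st.1.getD st.2.2 [] ++ [s.1])
  let w_dict := st.2.1.insert st.2.2 (st.2.1.getD st.2.2 0 + s.2)
  let next_g := ((PySem.List.min? w_dict.items (fun p => p.2)).getD (0, 0)).1
  (groups, w_dict, next_g)

def mp_balancer (task_list : List Int) (n_groups : Int) (weights : Option (List Int)) : List (Int × List Int) :=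
  let ws := weights.getD (List.replicate task_list.length 1)
  let s_list := PySem.List.sorted (task_list.zip ws) (fun p => p.2) true
  let groups : PySem.Dict Int (List Int) :=
    (PySem.List.pyRange 0 n_groups 1).foldl (fun d k => d.insert k []) PySem.Dict.empty
  let w_dict : PySem.Dict Int Int :=
    (PySem.List.pyRange 0 n_groups 1).foldl (fun d k => d.insert k 0) PySem.Dict.empty
  (s_list.foldl mpStepA (groups, w_dict, 0)).1.items

-- ===== PORT B =====
-- Python tuple comparison (a, b) < (c, d) on int pairs
def pyLexLt (a b : Int × Int) : Bool := a.1 < b.1 || (a.1 == b.1 && a.2 < b.2)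

-- B's linear-scan 'while i < len(order) and order[i] < entry: i += 1; order.insert(i, entry)'
def insOrd (x : Int × Int) : List (Int × Int) → List (Int × Int)
  | [] => [x]
  | y :: t => if pyLexLt y x then y :: insOrd x t else x :: y :: t

-- one iteration of B's loop; state = (buckets, order);  order.pop(0) on the empty list
-- (Python: IndexError, only reachable when n_groups <= 0 with tasks) is outside Pre_
def mpStepB (st : List (List Int) × List (Int × Int)) (s : Int × Int) :
    List (List Int) × List (Int × Int) :=
  match st.2 with
  | [] => st
  | (load, k) :: rest =>
      (st.1.set k.toNat (st.1.getD k.toNat [] ++ [s.1]), insOrd (load + s.2, k) rest)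

def mp_balancer_alt (task_list : List Int) (n_groups : Int) (weights : Option (List Int)) : List (Int × List Int) :=
  let ws := weights.getD (List.replicate task_list.length 1)
  let pairs := PySem.List.sorted (task_list.zip ws) (fun p => p.2) true
  let buckets : List (List Int) := (PySem.List.pyRange 0 n_groups 1).map (fun _ => [])
  let order : List (Int × Int) := (PySem.List.pyRange 0 n_groups 1).map (fun k => (0, k))
  let fin := pairs.foldl mpStepB (buckets, order)
  PySem.List.enumerate fin.1 0

-- ===== PRECONDITION & SPEC =====
-- Pre_ excludes exactly the inputs where Python A raises (KeyError / ValueError on min of an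
-- empty dict): n_groups < 1 while the zip of tasks and weights is nonempty.
def Pre_mp_balancer (task_list : List Int) (n_groups : Int) (weights : Option (List Int)) : Prop :=
  1 ≤ n_groups ∨ task_list = [] ∨ weights = some []
instance (task_list : List Int) (n_groups : Int) (weights : Option (List Int)) : Decidable (Pre_mp_balancer task_list n_groups weights) := by unfold Pre_mp_balancer; infer_instance

def pvWitness_mp_balancer : List Int × Int × Option (List Int) := ([3, 1, 2, 5], 2, none)

def Spec_mp_balancer (task_list : List Int) (n_groups : Int) (weights : Option (List Int)) (out : List (Int × List Int)) : Prop := out = mp_balancer_alt task_list n_groups weights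
instance (task_list : List Int) (n_groups : Int) (weights : Option (List Int)) (out : List (Int × List Int)) : Decidable (Spec_mp_balancer task_list n_groups weights out) := by unfold Spec_mp_balancer; infer_instance

-- ===== CLAIM (what is proved, stated in full; the proofs are below) =====
def Claim_equal_mp_balancer : Prop := ∀ (task_list : List Int) (n_groups : Int) (weights : Option (List Int)), Dom_mp_balancer task_list n_groups weights → Pre_mp_balancer task_list n_groups weights → Spec_mp_balancer task_list n_groups weights (mp_balancer task_list n_groups weights)

-- ===== LEMMAS AND PROOFS =====

-- `E` abbreviates enumerate-from-0 in the proofs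
def E {α : Type} (xs : List α) : List (Int × α) := PySem.List.enumerate xs 0

lemma enum_cons {α : Type} (x : α) (t : List α) (s : Int) :
    PySem.List.enumerate (x :: t) s = (s, x) :: PySem.List.enumerate t (s + 1) := by
  simp [PySem.List.enumerate]

lemma enum_fst_ge {α : Type} : ∀ (xs : List α) (s : Int) (p : Int × α),
    p ∈ PySem.List.enumerate xs s → s ≤ p.1
  | [], s, p => by simp [PySem.List.enumerate]
  | x :: t, s, p => by
    rw [enum_cons]
    intro h
    rcases List.mem_cons.1 h with h | h
    · subst h; simp
    · have := enum_fst_ge t (s + 1) p h; omega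

lemma mem_enum {α : Type} : ∀ (xs : List α) (s i : Int) (v : α),
    (i, v) ∈ PySem.List.enumerate xs s ↔ ∃ n : Nat, n < xs.length ∧ i = s + n ∧ xs[n]? = some v
  | [], s, i, v => by simp [PySem.List.enumerate]
  | x :: t, s, i, v => by
    rw [enum_cons]
    constructor
    · intro h
      rcases List.mem_cons.1 h with h | h
      · obtain ⟨h1, h2⟩ := Prod.mk.injEq .. ▸ h
        exact ⟨0, by simp, by omega, by simp [h2.symm]⟩
      · obtain ⟨n, hn, hi, hv⟩ := (mem_enum t (s + 1) i v).1 h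
        refine ⟨n + 1, by simpa using hn, by push_cast; omega, by simpa using hv⟩
    · rintro ⟨n, hn, hi, hv⟩
      cases n with
      | zero =>
        simp only [List.getElem?_cons_zero, Option.some.injEq] at hv
        simp only [Nat.cast_zero, add_zero] at hi
        subst hi
        cases hv
        exact List.mem_cons_self
      | succ m =>
        right
        refine (mem_enum t (s + 1) i v).2 ⟨m, by simpa using hn, by push_cast at hi ⊢; omega, by simpa using hv⟩

lemma enum_set {α : Type} : ∀ (xs : List α) (n : Nat) (v : α) (s : Int), n < xs.length →
    PySem.List.enumerate (xs.set n v) s =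
      (PySem.List.enumerate xs s).map
        (fun p => if p.1 == s + (n : Int) then (s + (n : Int), v) else p)
  | [], n, v, s => by simp
  | x :: t, 0, v, s => by
    intro _
    rw [List.set_cons_zero, enum_cons, enum_cons, List.map_cons]
    congr 1
    · simp
    · rw [List.map_congr_left, List.map_id]
      intro p hp
      have := enum_fst_ge t (s + 1) p hp
      have hcond : ¬ ((p.1 == s + ((0 : Nat) : Int)) = true) := by
        simp only [beq_iff_eq]
        push_cast
        omega
      rw [if_neg hcond]
      rfl
  | x :: t, n + 1, v, s => by
    intro h
    rw [List.set_cons_succ, enum_cons, enum_cons, List.map_cons]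
    congr 1
    · have hcond : ¬ (((s, x).1 == s + ((n + 1 : Nat) : Int)) = true) := by
        simp only [beq_iff_eq]
        push_cast
        omega
      rw [if_neg hcond]
    · rw [enum_set t n v (s + 1) (by simpa using h)]
      have harith : s + 1 + (n : Int) = s + ((n + 1 : Nat) : Int) := by push_cast; ring
      rw [harith]

lemma enum_map_pyRange {α : Type} (f : Int → α) : ∀ (n : Nat) (a : Int),
    PySem.List.enumerate ((PySem.List.pyRange a (a + n) 1).map f) a
      = (PySem.List.pyRange a (a + n) 1).map (fun k => (k, f k))
  | 0, a => by
    rw [PySem.List.pyRange_one_eq_nil (by omega)]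
    rfl
  | n + 1, a => by
    rw [PySem.List.pyRange_one_cons (by push_cast; omega : a < a + ((n + 1 : Nat) : Int)),
        List.map_cons, List.map_cons, enum_cons]
    have harith : a + ((n + 1 : Nat) : Int) = (a + 1) + (n : Int) := by push_cast; ring
    rw [harith, enum_map_pyRange f n (a + 1)]

lemma enum_map_pyRange0 {α : Type} (f : Int → α) (n : Int) :
    PySem.List.enumerate ((PySem.List.pyRange 0 n 1).map f) 0
      = (PySem.List.pyRange 0 n 1).map (fun k => (k, f k)) := by
  by_cases h : n ≤ 0
  · rw [PySem.List.pyRange_one_eq_nil h]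
    rfl
  · have hn : n = 0 + ((n.toNat : Nat) : Int) := by omega
    rw [hn]
    exact enum_map_pyRange f n.toNat 0

lemma pyLexLt_trichotomy (a b : Int × Int) : pyLexLt a b = true ∨ pyLexLt b a = true ∨ a = b := by
  simp only [pyLexLt, Bool.or_eq_true, Bool.and_eq_true, decide_eq_true_eq, beq_iff_eq]
  rcases lt_trichotomy a.1 b.1 with h | h | h
  · exact Or.inl (Or.inl h)
  · rcases lt_trichotomy a.2 b.2 with h2 | h2 | h2
    · exact Or.inl (Or.inr ⟨h, h2⟩)
    · exact Or.inr (Or.inr (Prod.ext h h2))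
    · exact Or.inr (Or.inl (Or.inr ⟨h.symm, h2⟩))
  · exact Or.inr (Or.inl (Or.inl h))

lemma pyLexLt_trans {a b c : Int × Int} (h1 : pyLexLt a b = true) (h2 : pyLexLt b c = true) :
    pyLexLt a c = true := by
  simp only [pyLexLt, Bool.or_eq_true, Bool.and_eq_true, decide_eq_true_eq, beq_iff_eq] at *
  omega

lemma mem_insOrd {x z : Int × Int} : ∀ {l : List (Int × Int)}, z ∈ insOrd x l ↔ z = x ∨ z ∈ l
  | [] => by simp [insOrd]
  | y :: t => by
    simp only [insOrd]
    split
    · simp only [List.mem_cons, mem_insOrd (l := t)]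
      tauto
    · simp

lemma insOrd_perm (x : Int × Int) : ∀ (l : List (Int × Int)), (insOrd x l).Perm (x :: l)
  | [] => by simp [insOrd]
  | y :: t => by
    simp only [insOrd]
    split
    · exact ((insOrd_perm x t).cons y).trans (List.Perm.swap x y t)
    · exact List.Perm.refl _

lemma insOrd_pairwise {x : Int × Int} : ∀ {l : List (Int × Int)},
    l.Pairwise (fun a b => pyLexLt a b = true) → (∀ y ∈ l, y.2 ≠ x.2) →
    (insOrd x l).Pairwise (fun a b => pyLexLt a b = true)
  | [] => by intro _ _; simp [insOrd]
  | y :: t => by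
    intro hp hd
    rw [List.pairwise_cons] at hp
    simp only [insOrd]
    split
    case isTrue hyx =>
      rw [List.pairwise_cons]
      refine ⟨?_, insOrd_pairwise hp.2 (fun z hz => hd z (List.mem_cons_of_mem y hz))⟩
      intro z hz
      rcases mem_insOrd.1 hz with rfl | hz
      · exact hyx
      · exact hp.1 z hz
    case isFalse hyx =>
      have hxy : pyLexLt x y = true := by
        rcases pyLexLt_trichotomy y x with h | h | h
        · exact absurd h hyx
        · exact h
        · exact absurd (congrArg Prod.snd h) (hd y List.mem_cons_self)
      rw [List.pairwise_cons]
      refine ⟨?_, List.pairwise_cons.2 hp⟩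
      intro z hz
      rcases List.mem_cons.1 hz with rfl | hz
      · exact hxy
      · exact pyLexLt_trans hxy (hp.1 z hz)

lemma min?_first : ∀ (t : List (Int × Int)) (acc m : Int × Int),
    (acc :: t).Pairwise (fun a b => a.1 < b.1) → m ∈ acc :: t →
    (∀ y ∈ acc :: t, y ≠ m → (m.2 < y.2 ∨ (m.2 = y.2 ∧ m.1 < y.1))) →
    t.foldl (fun a x => match a with
      | none => some x
      | some mm => if x.2 < mm.2 then some x else some mm) (some acc) = some m
  | [], acc, m => by
    intro _ hm _
    simp only [List.mem_singleton] at hm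
    simp [hm]
  | y :: t', acc, m => by
    intro hfst hm hP
    have hay : acc.1 < y.1 :=
      (List.pairwise_cons.1 hfst).1 y List.mem_cons_self
    simp only [List.foldl_cons]
    by_cases hy : y.2 < acc.2
    · rw [if_pos hy]
      have hma : m ≠ acc := by
        rintro rfl
        have hym : y ≠ m := by
          rintro rfl; exact lt_irrefl _ hy
        rcases hP y (List.mem_cons_of_mem _ List.mem_cons_self) hym with h | ⟨h1, _⟩
        · omega
        · omega
      have hm' : m ∈ y :: t' := by
        rcases List.mem_cons.1 hm with rfl | hm
        · exact absurd rfl hma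
        · exact hm
      exact min?_first t' y m (List.pairwise_cons.1 hfst).2 hm'
        (fun z hz hzm => hP z (List.mem_cons_of_mem _ hz) hzm)
    · rw [if_neg hy]
      have hmy : m ≠ y := by
        rintro rfl
        have hacc : acc ≠ m := by
          rintro rfl; exact lt_irrefl _ hay
        rcases hP acc List.mem_cons_self hacc with h | ⟨h1, h2⟩
        · omega
        · omega
      have hm' : m ∈ acc :: t' := by
        rcases List.mem_cons.1 hm with rfl | hm
        · exact List.mem_cons_self
        · rcases List.mem_cons.1 hm with rfl | hm
          · exact absurd rfl hmy
          · exact List.mem_cons_of_mem _ hm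
      have hsub : (acc :: t').Sublist (acc :: y :: t') :=
        List.Sublist.cons₂ acc (List.sublist_cons_self y t')
      refine min?_first t' acc m (hfst.sublist hsub) hm' ?_
      intro z hz hzm
      rcases List.mem_cons.1 hz with rfl | hz
      · exact hP z List.mem_cons_self hzm
      · exact hP z (List.mem_cons_of_mem _ (List.mem_cons_of_mem _ hz)) hzm

lemma min?_first' {xs : List (Int × Int)} {m : Int × Int}
    (hfst : xs.Pairwise (fun a b => a.1 < b.1)) (hm : m ∈ xs)
    (hP : ∀ y ∈ xs, y ≠ m → (m.2 < y.2 ∨ (m.2 = y.2 ∧ m.1 < y.1))) :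
    PySem.List.min? xs (fun p => p.2) = some m := by
  cases xs with
  | nil => simp at hm
  | cons x t =>
    have hrw : PySem.List.min? (x :: t) (fun p => p.2)
        = (x :: t).foldl (fun a x => match a with
          | none => some x
          | some mm => if x.2 < mm.2 then some x else some mm) none := by
      unfold PySem.List.min?
      refine PySem.List.foldl_congr_mem _ _ _ _ ?_
      intro acc z _
      cases acc with
      | none => rfl
      | some mm => rfl
    rw [hrw, List.foldl_cons]
    exact min?_first t x m hfst hm hP

-- fst components of enumerate-from-0 are strictly increasing, and are nodup
lemma enum_fst_pairwise {α : Type} (xs : List α) :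
    (E xs).Pairwise (fun a b => a.1 < b.1) := by
  have h := PySem.List.map_fst_enumerate xs 0
  have hpw := PySem.List.pairwise_lt_pyRange_one 0 (0 + (xs.length : Int))
  rw [← h] at hpw
  exact (List.pairwise_map.1 hpw)

lemma enum_fst_nodup {α : Type} (xs : List α) : ((E xs).map (·.1)).Nodup := by
  have h := PySem.List.map_fst_enumerate xs 0
  rw [E, h]
  exact PySem.List.nodup_pyRange_one _ _

lemma E_set {α : Type} (xs : List α) (n : Nat) (v : α) (h : n < xs.length) :
    E (xs.set n v) = (E xs).map (fun p => if p.1 == (n : Int) then ((n : Int), v) else p) := by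
  have := enum_set xs n v 0 h
  simpa [E] using this

lemma mem_E {α : Type} {xs : List α} {i : Int} {v : α} :
    (i, v) ∈ E xs ↔ ∃ n : Nat, n < xs.length ∧ i = (n : Int) ∧ xs[n]? = some v := by
  simpa [E] using mem_enum xs 0 i v

lemma E_map_pyRange {α : Type} (f : Int → α) (n : Int) :
    E ((PySem.List.pyRange 0 n 1).map f) = (PySem.List.pyRange 0 n 1).map (fun k => (k, f k)) :=
  enum_map_pyRange0 f n

-- the coupling invariant between A's state (gA, wA, next) and B's state (bs, ord), via the loads list ls
def PVInv (gA : PySem.Dict Int (List Int)) (wA : PySem.Dict Int Int) (next : Int)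
    (bs : List (List Int)) (ord : List (Int × Int)) (ls : List Int) : Prop :=
  ls.length = bs.length ∧
  gA.items = E bs ∧
  wA.items = E ls ∧
  ord.Pairwise (fun a b => pyLexLt a b = true) ∧
  ord.Perm ((E ls).map (fun p => (p.2, p.1))) ∧
  (∀ l k t, ord = (l, k) :: t → next = k)

lemma step_inv {gA : PySem.Dict Int (List Int)} {wA : PySem.Dict Int Int} {next : Int}
    {bs : List (List Int)} {ord : List (Int × Int)} {ls : List Int} (s : Int × Int)
    (h : PVInv gA wA next bs ord ls) (hne : 1 ≤ bs.length) :
    ∃ ls', PVInv (mpStepA (gA, wA, next) s).1 (mpStepA (gA, wA, next) s).2.1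
      (mpStepA (gA, wA, next) s).2.2 (mpStepB (bs, ord) s).1 (mpStepB (bs, ord) s).2 ls' ∧
      (mpStepB (bs, ord) s).1.length = bs.length := by
  obtain ⟨hlen, hg, hw, hpw, hperm, hnext⟩ := h
  have hordlen : ord.length = ls.length := by
    rw [hperm.length_eq]; simp [E, PySem.List.length_enumerate]
  cases ord with
  | nil => simp at hordlen; omega
  | cons p rest =>
  obtain ⟨l0, k0⟩ := p
  have hnk : next = k0 := hnext l0 k0 rest rfl
  subst next
  -- locate k0 in ls
  have hk0mem : (k0, l0) ∈ E ls := by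
    have hmm : (l0, k0) ∈ (E ls).map (fun p => (p.2, p.1)) := hperm.subset List.mem_cons_self
    obtain ⟨q, hq, hqe⟩ := List.mem_map.1 hmm
    have h1 : q.2 = l0 := congrArg Prod.fst hqe
    have h2 : q.1 = k0 := congrArg Prod.snd hqe
    have : q = (k0, l0) := Prod.ext h2 h1
    rwa [this] at hq
  obtain ⟨n0, hn0, hk0, hl0⟩ := mem_E.1 hk0mem
  have hk0n : k0.toNat = n0 := by omega
  have hn0b : n0 < bs.length := by omega
  have hb0 : bs[n0]? = some bs[n0] := List.getElem?_eq_getElem hn0b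
  have hl0' : ls[n0] = l0 := by
    have := List.getElem?_eq_getElem hn0
    rw [this] at hl0
    exact Option.some.inj hl0
  -- nodup keys of A's dicts
  have hgnd : gA.keys.Nodup := by
    have hk : gA.keys = gA.items.map (fun p => p.1) := by simp only [PySem.Dict.keys]
    rw [hk, hg]
    exact enum_fst_nodup bs
  have hwnd : wA.keys.Nodup := by
    have hk : wA.keys = wA.items.map (fun p => p.1) := by simp only [PySem.Dict.keys]
    rw [hk, hw]
    exact enum_fst_nodup ls
  -- looked-up values
  have hkb : (k0, bs[n0]) ∈ E bs := mem_E.2 ⟨n0, hn0b, by omega, hb0⟩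
  have hgget : gA.getD k0 [] = bs[n0] :=
    PySem.Dict.getD_of_mem_items gA (by rw [hg]; exact hkb) hgnd []
  have hwget : wA.getD k0 0 = l0 :=
    PySem.Dict.getD_of_mem_items wA (by rw [hw]; exact hk0mem) hwnd 0
  -- membership of k0 in the keys
  have hgc : gA.contains k0 = true := by
    rw [PySem.Dict.contains_iff_mem_keys]
    have hk : gA.keys = gA.items.map (fun p => p.1) := by simp only [PySem.Dict.keys]
    rw [hk, hg]
    show k0 ∈ (PySem.List.enumerate bs 0).map (fun p => p.1)
    rw [PySem.List.map_fst_enumerate]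
    exact PySem.List.mem_pyRange_one.2 ⟨by omega, by omega⟩
  have hwc : wA.contains k0 = true := by
    rw [PySem.Dict.contains_iff_mem_keys]
    have hk : wA.keys = wA.items.map (fun p => p.1) := by simp only [PySem.Dict.keys]
    rw [hk, hw]
    show k0 ∈ (PySem.List.enumerate ls 0).map (fun p => p.1)
    rw [PySem.List.map_fst_enumerate]
    exact PySem.List.mem_pyRange_one.2 ⟨by omega, by omega⟩
  -- reduce the two step functions
  have hstepB : mpStepB (bs, (l0, k0) :: rest) s
      = (bs.set k0.toNat (bs.getD k0.toNat [] ++ [s.1]), insOrd (l0 + s.2, k0) rest) := rfl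
  have hstepA : mpStepA (gA, wA, k0) s
      = (gA.insert k0 (gA.getD k0 [] ++ [s.1]), wA.insert k0 (wA.getD k0 0 + s.2),
         ((PySem.List.min? (wA.insert k0 (wA.getD k0 0 + s.2)).items (fun p => p.2)).getD (0, 0)).1) := rfl
  rw [hstepA, hstepB]
  dsimp only
  -- B's bucket update in terms of getElem
  have hbget : bs.getD k0.toNat [] = bs[n0] := by
    rw [hk0n]
    exact List.getD_eq_getElem bs [] hn0b
  have hcast : ((n0 : Nat) : Int) = k0 := by omega
  -- new group items
  have hgitems : (gA.insert k0 (gA.getD k0 [] ++ [s.1])).items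
      = E (bs.set k0.toNat (bs.getD k0.toNat [] ++ [s.1])) := by
    rw [hbget, hk0n, E_set bs n0 (bs[n0] ++ [s.1]) hn0b, hcast,
        PySem.Dict.items_insert_of_contains gA _ hgc, hg, hgget]
  -- new weight items
  have hwitems : (wA.insert k0 (wA.getD k0 0 + s.2)).items = E (ls.set n0 (l0 + s.2)) := by
    rw [E_set ls n0 (l0 + s.2) hn0, hcast,
        PySem.Dict.items_insert_of_contains wA _ hwc, hw, hwget]
  -- snd components of ord are nodup
  have hsnd : (((l0, k0) :: rest).map (fun p : Int × Int => p.2)).Nodup := by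
    have hp2 := hperm.map (fun p : Int × Int => p.2)
    rw [List.map_map] at hp2
    have heq : (E ls).map ((fun p : Int × Int => p.2) ∘ (fun p : Int × Int => (p.2, p.1)))
        = (E ls).map (fun p : Int × Int => p.1) := rfl
    rw [heq] at hp2
    exact hp2.nodup_iff.2 (enum_fst_nodup ls)
  have hk0rest : ∀ y ∈ rest, y.2 ≠ k0 := by
    rw [List.map_cons] at hsnd
    have h1 : k0 ∉ rest.map (fun p : Int × Int => p.2) := (List.nodup_cons.1 hsnd).1
    intro y hy hc
    exact h1 (hc ▸ List.mem_map_of_mem hy)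
  -- the new order list: sorted and a permutation of the swapped enumerate
  have hpwrest := (List.pairwise_cons.1 hpw).2
  have hpw' : (insOrd (l0 + s.2, k0) rest).Pairwise (fun a b => pyLexLt a b = true) :=
    insOrd_pairwise hpwrest (fun y hy => hk0rest y hy)
  have hmaph := hperm.map (fun q : Int × Int => if q.2 == k0 then (l0 + s.2, k0) else q)
  have hl : ((l0, k0) :: rest).map (fun q : Int × Int => if q.2 == k0 then (l0 + s.2, k0) else q)
      = (l0 + s.2, k0) :: rest := by
    rw [List.map_cons]
    congr 1
    · simp
    · have : ∀ y ∈ rest, (fun q : Int × Int => if q.2 == k0 then (l0 + s.2, k0) else q) y = id y := by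
        intro y hy
        have := hk0rest y hy
        simp only [id]
        rw [if_neg (by simpa using this)]
      rw [List.map_congr_left this, List.map_id]
  have hrhs : ((E ls).map (fun p : Int × Int => (p.2, p.1))).map
        (fun q : Int × Int => if q.2 == k0 then (l0 + s.2, k0) else q)
      = (E (ls.set n0 (l0 + s.2))).map (fun p : Int × Int => (p.2, p.1)) := by
    rw [E_set ls n0 (l0 + s.2) hn0, hcast, List.map_map, List.map_map]
    apply List.map_congr_left
    intro p _
    by_cases hc : p.1 = k0
    · simp [Function.comp, hc]
    · simp [Function.comp, hc]
  rw [hl, hrhs] at hmaph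
  have hperm' : (insOrd (l0 + s.2, k0) rest).Perm
      ((E (ls.set n0 (l0 + s.2))).map (fun p : Int × Int => (p.2, p.1))) :=
    (insOrd_perm _ rest).trans hmaph
  -- assemble
  refine ⟨ls.set n0 (l0 + s.2), ⟨by simpa using hlen, hgitems, hwitems, hpw', hperm', ?_⟩,
    by simp⟩
  -- the recomputed next_g is the head of the new order list
  intro l1 k1 t1 hordeq
  rw [hwitems]
  rw [hordeq] at hperm' hpw'
  have hm1 : (k1, l1) ∈ E (ls.set n0 (l0 + s.2)) := by
    have hmm : (l1, k1) ∈ (E (ls.set n0 (l0 + s.2))).map (fun p : Int × Int => (p.2, p.1)) :=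
      hperm'.subset List.mem_cons_self
    obtain ⟨q, hq, hqe⟩ := List.mem_map.1 hmm
    have h1 : q.2 = l1 := congrArg Prod.fst hqe
    have h2 : q.1 = k1 := congrArg Prod.snd hqe
    have : q = (k1, l1) := Prod.ext h2 h1
    rwa [this] at hq
  have hmin : PySem.List.min? (E (ls.set n0 (l0 + s.2))) (fun p => p.2) = some (k1, l1) := by
    apply min?_first' (enum_fst_pairwise _) hm1
    intro y hy hyne
    have hsw : (y.2, y.1) ∈ (l1, k1) :: t1 :=
      hperm'.symm.subset (List.mem_map_of_mem hy)
    rcases List.mem_cons.1 hsw with heq | hmem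
    · exfalso
      apply hyne
      have h1 : y.2 = l1 := congrArg Prod.fst heq
      have h2 : y.1 = k1 := congrArg Prod.snd heq
      exact Prod.ext h2 h1
    · have := (List.pairwise_cons.1 hpw').1 _ hmem
      simp only [pyLexLt, Bool.or_eq_true, Bool.and_eq_true, decide_eq_true_eq, beq_iff_eq] at this
      simpa using this
  rw [hmin]
  rfl

lemma fold_inv : ∀ (pairs : List (Int × Int)) (gA : PySem.Dict Int (List Int))
    (wA : PySem.Dict Int Int) (next : Int) (bs : List (List Int)) (ord : List (Int × Int))
    (ls : List Int), PVInv gA wA next bs ord ls → 1 ≤ bs.length →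
    (pairs.foldl mpStepA (gA, wA, next)).1.items
      = PySem.List.enumerate (pairs.foldl mpStepB (bs, ord)).1 0
  | [], gA, wA, next, bs, ord, ls => by
    intro h _
    simpa [E] using h.2.1
  | s :: ps, gA, wA, next, bs, ord, ls => by
    intro h hne
    obtain ⟨ls', h', hlen⟩ := step_inv s h hne
    have h1 : 1 ≤ (mpStepB (bs, ord) s).1.length := by omega
    simp only [List.foldl_cons]
    exact fold_inv ps _ _ _ _ _ ls' h' h1

lemma init_inv (n : Int) :
    PVInv ((PySem.List.pyRange 0 n 1).foldl (fun d k => d.insert k []) PySem.Dict.empty)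
        ((PySem.List.pyRange 0 n 1).foldl (fun d k => d.insert k 0) PySem.Dict.empty)
        0
        ((PySem.List.pyRange 0 n 1).map (fun _ => []))
        ((PySem.List.pyRange 0 n 1).map (fun k => (0, k)))
        ((PySem.List.pyRange 0 n 1).map (fun _ => 0)) := by
  have hgit : ((PySem.List.pyRange 0 n 1).foldl
        (fun d k => d.insert k []) (PySem.Dict.empty : PySem.Dict Int (List Int))).items
      = (PySem.List.pyRange 0 n 1).map (fun k => (k, ([] : List Int))) := by
    have := PySem.Dict.items_foldl_insert_fresh (PySem.List.pyRange 0 n 1) (fun k => k)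
      (fun _ => ([] : List Int)) PySem.Dict.empty
      (fun a _ => PySem.Dict.contains_empty a) (by simpa using PySem.List.nodup_pyRange_one 0 n)
    simpa using this
  have hwit : ((PySem.List.pyRange 0 n 1).foldl
        (fun d k => d.insert k 0) (PySem.Dict.empty : PySem.Dict Int Int)).items
      = (PySem.List.pyRange 0 n 1).map (fun k => (k, (0 : Int))) := by
    have := PySem.Dict.items_foldl_insert_fresh (PySem.List.pyRange 0 n 1) (fun k => k)
      (fun _ => (0 : Int)) PySem.Dict.empty
      (fun a _ => PySem.Dict.contains_empty a) (by simpa using PySem.List.nodup_pyRange_one 0 n)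
    simpa using this
  refine ⟨by simp, ?_, ?_, ?_, ?_, ?_⟩
  · rw [hgit, E_map_pyRange]
  · rw [hwit, E_map_pyRange]
  · refine List.pairwise_map.2 (List.Pairwise.imp ?_ (PySem.List.pairwise_lt_pyRange_one 0 n))
    intro a b h
    simp only [pyLexLt, Bool.or_eq_true, Bool.and_eq_true, decide_eq_true_eq, beq_iff_eq]
    exact Or.inr ⟨trivial, h⟩
  · rw [E_map_pyRange, List.map_map]
    exact List.Perm.refl _
  · intro l k t h
    by_cases h0 : 0 < n
    · rw [PySem.List.pyRange_one_cons h0, List.map_cons] at h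
      simp only [List.cons.injEq, Prod.mk.injEq] at h
      exact h.1.2
    · rw [PySem.List.pyRange_one_eq_nil (by omega)] at h
      simp at h

-- ===== VERDICT (by name: the statement is the Claim_ definition above) =====
theorem mp_balancer_spec : Claim_equal_mp_balancer := by
  intro tl n w _ hpre
  show mp_balancer tl n w = mp_balancer_alt tl n w
  simp only [mp_balancer, mp_balancer_alt]
  by_cases hn : 1 ≤ n
  · have hlen1 : 1 ≤ ((PySem.List.pyRange 0 n 1).map (fun _ => ([] : List Int))).length := by
      simp only [List.length_map, PySem.List.length_pyRange_one]
      omega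
    exact fold_inv _ _ _ _ _ _ _ (init_inv n) hlen1
  · have hz : tl.zip (w.getD (List.replicate tl.length 1)) = [] := by
      rcases hpre with h | h | h
      · exact absurd h hn
      · subst h; rfl
      · subst h; simp
    rw [hz]
    have hs : PySem.List.sorted ([] : List (Int × Int)) (fun p => p.2) true = [] := rfl
    rw [hs]
    simp only [List.foldl_nil]
    have := (init_inv n).2.1
    simpa [E] using this
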